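-- pv_equiv track=rewrite | github.com/tobywynne-mellor/Ethereum-Big-Data | scripts/D_gas_guzzler.py | combiner
-- ===== SOURCE A (Python) =====
-- def combiner(date, values):
-- 	gas_total = 0
-- 	gas_count = 0
-- 	price_total = 0
-- 	price_count = 0
--
-- 	for value in values:
-- 		if value[0] == "gas":
-- 			gas_total += value[1]
-- 			gas_count += 1
-- 		elif value[0] == "price":
-- 			price_total += value[1]
-- 			price_count += 1
--
-- 	yield(date, ("gas", gas_total, gas_count))
-- 	yield(date, ("price", price_total, price_count))
-- ===== SOURCE B (Python) =====
-- def combiner(date, values):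
-- 	items = list(values)
--
-- 	def agg(seg):
-- 		# divide-and-conquer aggregation: merge partial (gas_total, gas_count, price_total, price_count)
-- 		if len(seg) <= 1:
-- 			if not seg:
-- 				return (0, 0, 0, 0)
-- 			v = seg[0]
-- 			if v[0] == "gas":
-- 				return (v[1], 1, 0, 0)
-- 			elif v[0] == "price":
-- 				return (0, 0, v[1], 1)
-- 			else:
-- 				return (0, 0, 0, 0)
-- 		m = len(seg) // 2
-- 		a = agg(seg[:m])
-- 		b = agg(seg[m:])
-- 		return (a[0] + b[0], a[1] + b[1], a[2] + b[2], a[3] + b[3])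
--
-- 	gas_total, gas_count, price_total, price_count = agg(items)
-- 	yield (date, ("gas", gas_total, gas_count))
-- 	yield (date, ("price", price_total, price_count))
-- ===== Notes on version B (the rewrite author's own statement) =====
-- stated objective: alternative
-- what changed: Replaces A's single fused accumulator loop by a recursive divide-and-conquer that splits the list in halves, aggregates each half, and merges the partial (total,count) tuples componentwise.
import Mathlib
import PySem

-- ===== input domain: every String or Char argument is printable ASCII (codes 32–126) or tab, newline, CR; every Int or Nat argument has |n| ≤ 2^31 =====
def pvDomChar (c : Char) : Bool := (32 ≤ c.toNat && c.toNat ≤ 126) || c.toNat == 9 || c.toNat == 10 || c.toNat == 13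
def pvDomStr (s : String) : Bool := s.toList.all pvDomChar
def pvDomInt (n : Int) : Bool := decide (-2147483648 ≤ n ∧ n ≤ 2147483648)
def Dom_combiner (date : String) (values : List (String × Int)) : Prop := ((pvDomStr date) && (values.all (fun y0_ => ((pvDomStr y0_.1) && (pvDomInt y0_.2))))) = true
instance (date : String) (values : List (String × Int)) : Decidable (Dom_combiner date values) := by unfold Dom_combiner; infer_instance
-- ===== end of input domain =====

-- B replaces A's single fused accumulator loop by recursive divide-and-conquer: split in halves,
-- aggregate each half, merge partial (total,count) tuples (alternative decomposition, not faster).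
-- Both Pythons are generators; equivalence is about the sequence of yielded pairs (modelled as a list).

-- ===== PORT A =====
def combiner (date : String) (values : List (String × Int)) : List (String × (String × Int × Int)) :=
  let s := values.foldl
    (fun (st : Int × Int × Int × Int) v =>
      if v.1 == "gas" then (st.1 + v.2, st.2.1 + 1, st.2.2.1, st.2.2.2)
      else if v.1 == "price" then (st.1, st.2.1, st.2.2.1 + v.2, st.2.2.2 + 1)
      else st)
    (0, 0, 0, 0)
  [(date, ("gas", s.1, s.2.1)), (date, ("price", s.2.2.1, s.2.2.2))]

-- ===== PORT B =====
-- recursive divide-and-conquer aggregation from Source B's `agg`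
-- (fuel is a totality guard only: seg.length bounds the recursion depth, see combinerAggGo_eq)
def combinerAggGo : Nat → List (String × Int) → Int × Int × Int × Int
  | 0, _ => (0, 0, 0, 0)
  | fuel + 1, seg =>
    if seg.length ≤ 1 then
      match seg with
      | [] => (0, 0, 0, 0)
      | v :: _ =>
        if v.1 == "gas" then (v.2, 1, 0, 0)
        else if v.1 == "price" then (0, 0, v.2, 1)
        else (0, 0, 0, 0)
    else
      let m := seg.length / 2
      let a := combinerAggGo fuel (seg.take m)
      let b := combinerAggGo fuel (seg.drop m)
      (a.1 + b.1, a.2.1 + b.2.1, a.2.2.1 + b.2.2.1, a.2.2.2 + b.2.2.2)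

def combinerAgg (seg : List (String × Int)) : Int × Int × Int × Int :=
  combinerAggGo seg.length seg

def combiner_alt (date : String) (values : List (String × Int)) : List (String × (String × Int × Int)) :=
  let s := combinerAgg values
  [(date, ("gas", s.1, s.2.1)), (date, ("price", s.2.2.1, s.2.2.2))]

-- ===== PRECONDITION & SPEC =====
def Spec_combiner (date : String) (values : List (String × Int)) (out : List (String × (String × Int × Int))) : Prop := out = combiner_alt date values
instance (date : String) (values : List (String × Int)) (out : List (String × (String × Int × Int))) : Decidable (Spec_combiner date values out) := by unfold Spec_combiner; infer_instance

-- ===== CLAIM (what is proved, stated in full; the proofs are below) =====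
def Claim_equal_combiner : Prop := ∀ (date : String) (values : List (String × Int)), Dom_combiner date values → Spec_combiner date values (combiner date values)

-- ===== LEMMAS AND PROOFS =====

-- closed form of both programs' aggregate
def aggSpec (l : List (String × Int)) : Int × Int × Int × Int :=
  (((l.filter (fun v => v.1 == "gas")).map (fun v => v.2)).sum,
   (((l.filter (fun v => v.1 == "gas")).map (fun v => v.2)).length : Int),
   ((l.filter (fun v => v.1 == "price")).map (fun v => v.2)).sum,
   (((l.filter (fun v => v.1 == "price")).map (fun v => v.2)).length : Int))

theorem aggSpec_append (l₁ l₂ : List (String × Int)) :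
    aggSpec (l₁ ++ l₂) =
      ((aggSpec l₁).1 + (aggSpec l₂).1, (aggSpec l₁).2.1 + (aggSpec l₂).2.1,
       (aggSpec l₁).2.2.1 + (aggSpec l₂).2.2.1, (aggSpec l₁).2.2.2 + (aggSpec l₂).2.2.2) := by
  simp only [aggSpec, List.filter_append, List.map_append, List.sum_append, List.length_append]
  push_cast
  trivial

theorem combinerAggGo_eq (fuel : Nat) : ∀ (seg : List (String × Int)), seg.length ≤ fuel → combinerAggGo fuel seg = aggSpec seg := by
  induction fuel with
  | zero =>
    intro seg hlen
    have : seg = [] := List.eq_nil_of_length_eq_zero (Nat.le_zero.mp hlen)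
    subst this
    simp [combinerAggGo, aggSpec]
  | succ n ih =>
    intro seg hlen
    simp only [combinerAggGo]
    by_cases h1 : seg.length ≤ 1
    · rw [if_pos h1]
      match seg, h1 with
      | [], _ => simp [aggSpec]
      | [v], _ =>
        by_cases hg : v.1 == "gas"
        · have hp : (v.1 == "price") = false := by have := eq_of_beq hg; simp [this]
          simp [hg, hp, aggSpec]
        · by_cases hp : v.1 == "price"
          · simp [hg, hp, aggSpec]
          · simp [hg, hp, aggSpec]
    · rw [if_neg h1]
      have iha := ih (seg.take (seg.length / 2)) (by simp [List.length_take]; omega)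
      have ihb := ih (seg.drop (seg.length / 2)) (by simp [List.length_drop]; omega)
      have hsplit : seg.take (seg.length / 2) ++ seg.drop (seg.length / 2) = seg :=
        List.take_append_drop _ seg
      simp only [iha, ihb]
      conv_rhs => rw [← hsplit]
      rw [aggSpec_append]

theorem combinerAgg_eq (seg : List (String × Int)) : combinerAgg seg = aggSpec seg := by
  unfold combinerAgg
  exact combinerAggGo_eq seg.length seg (le_refl _)

-- A's fold from any start adds the closed-form aggregate
theorem combiner_fold_inv (values : List (String × Int)) (a b c d : Int) :
    values.foldl
      (fun (st : Int × Int × Int × Int) v =>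
        if v.1 == "gas" then (st.1 + v.2, st.2.1 + 1, st.2.2.1, st.2.2.2)
        else if v.1 == "price" then (st.1, st.2.1, st.2.2.1 + v.2, st.2.2.2 + 1)
        else st)
      (a, b, c, d)
    = (a + (aggSpec values).1, b + (aggSpec values).2.1,
       c + (aggSpec values).2.2.1, d + (aggSpec values).2.2.2) := by
  induction values generalizing a b c d with
  | nil => simp [aggSpec]
  | cons v vs ih =>
    rw [List.foldl_cons]
    by_cases hg : v.1 == "gas"
    · have hp : (v.1 == "price") = false := by have := eq_of_beq hg; simp [this]
      rw [if_pos hg, ih]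
      simp only [aggSpec, List.filter_cons, hg, hp, if_true, Bool.false_eq_true, if_false,
        List.map_cons, List.sum_cons, List.length_cons, Prod.ext_iff]
      push_cast
      exact ⟨by ring, by ring, trivial⟩
    · rw [if_neg (by simpa using hg)]
      by_cases hp : v.1 == "price"
      · rw [if_pos hp, ih]
        simp only [aggSpec, List.filter_cons, hg, hp, Bool.false_eq_true, ite_false, if_true,
          List.map_cons, List.sum_cons, List.length_cons, Prod.ext_iff]
        push_cast
        exact ⟨trivial, trivial, by ring, by ring⟩
      · rw [if_neg (by simpa using hp), ih]
        simp only [aggSpec, List.filter_cons, hg, hp, Bool.false_eq_true, ite_false]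

-- ===== VERDICT (by name: the statement is the Claim_ definition above) =====
theorem combiner_spec : Claim_equal_combiner := by
  intro date values _
  unfold Spec_combiner combiner combiner_alt
  rw [combiner_fold_inv, combinerAgg_eq]
  simp
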